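-- pv_equiv track=rewrite | github.com/BrettRey/erdos-problem-993 | scripts/tight_mode_analysis.py | component_sizes
-- ===== SOURCE A (Python) =====
-- def component_sizes(adj: list[list[int]], removed: set[int]) -> list[int]:
--     """Return sorted component sizes of the forest after removing vertices."""
--     n = len(adj)
--     remaining = [v for v in range(n) if v not in removed]
--     if not remaining:
--         return []
--     rem_set = set(remaining)
--     seen = set()
--     sizes = []
--     for start in remaining:
--         if start in seen:
--             continue
--         comp_size = 0
--         stack = [start]
--         seen.add(start)
--         while stack:
--             u = stack.pop()
--             comp_size += 1
--             for v in adj[u]: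
--                 if v in rem_set and v not in seen:
--                     seen.add(v)
--                     stack.append(v)
--         sizes.append(comp_size)
--     return sorted(sizes, reverse=True)
-- ===== SOURCE B (Python) =====
-- def component_sizes(adj: list[list[int]], removed: set[int]) -> list[int]:
--     """Return sorted component sizes of the forest after removing vertices."""
--     n = len(adj)
--     rem = set(range(n)) - set(removed)
--     seen = set()
--     comps = []  # visited-order vertex list of each component
--     for start in range(n):
--         if start in rem and start not in seen:
--             order = [start]
--             seen.add(start)
--             i = 0
--             while i < len(order):
--                 for w in adj[order[i]]:
--                     if w in rem and w not in seen:
--                         seen.add(w)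
--                         order.append(w)
--                 i += 1
--             comps.append(order)
--     return sorted((len(c) for c in comps), reverse=True)
-- ===== Notes on version B (the rewrite author's own statement) =====
-- stated objective: alternative
-- what changed: Replaces the per-component explicit-stack depth-first search with an index-pointer breadth-first traversal that records each component's visited-order list (sizes taken as list lengths at the end), iterating all of range(n) with a set-difference remaining set instead of looping over a prefiltered remaining list with a counter.
import Mathlib
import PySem

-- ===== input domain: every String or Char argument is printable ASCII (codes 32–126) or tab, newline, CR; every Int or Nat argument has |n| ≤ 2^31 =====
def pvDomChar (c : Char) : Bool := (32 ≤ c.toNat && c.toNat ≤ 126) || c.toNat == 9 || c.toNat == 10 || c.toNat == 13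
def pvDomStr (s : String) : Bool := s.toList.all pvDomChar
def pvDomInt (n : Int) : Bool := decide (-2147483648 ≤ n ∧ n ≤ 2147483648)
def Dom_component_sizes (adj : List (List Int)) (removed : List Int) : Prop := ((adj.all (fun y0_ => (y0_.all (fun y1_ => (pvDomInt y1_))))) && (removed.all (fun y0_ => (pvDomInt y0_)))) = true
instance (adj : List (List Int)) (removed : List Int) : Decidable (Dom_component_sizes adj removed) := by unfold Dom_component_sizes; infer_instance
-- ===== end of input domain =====

-- B replaces A's per-component explicit-stack DFS over a prefiltered remaining list by an
-- index-pointer breadth-first traversal over all of range(n) that records each component's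
-- visited-order list and takes sizes as lengths at the end (objective: alternative, no speed claim).

-- helper fact cited by the ports' decreasing_by clauses (termination only)
theorem pvFilterStrict (p q : Int → Bool) (h : ∀ x, q x = true → p x = true)
    (v : Int) (hpv : p v = true) (hqv : q v = false) :
    ∀ l : List Int, v ∈ l →
      (l.filter q).length < (l.filter p).length := by
  have mono : ∀ l : List Int, (l.filter q).length ≤ (l.filter p).length := by
    intro l
    rw [← List.countP_eq_length_filter, ← List.countP_eq_length_filter]
    exact List.countP_mono_left (fun a _ ha => h a ha)
  intro l hv
  obtain ⟨l₁, l₂, rfl⟩ := List.append_of_mem hv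
  have m1 := mono l₁
  have m2 := mono l₂
  simp only [List.filter_append, List.filter_cons, hpv, hqv, List.length_append,
    Bool.false_eq_true, if_false, if_true, List.length_cons]
  omega

-- ===== PORT A =====
-- inner 'for v in adj[u]' loop of the DFS: seen.add(v) with v ∉ seen is seen ++ [v]
def pushNbrs (remSet : List Int) : List Int → List Int → List Int → List Int × List Int
  | seen, stack, [] => (seen, stack)
  | seen, stack, v :: vs =>
    if v ∈ remSet ∧ ¬ v ∈ seen then
      pushNbrs remSet (seen ++ [v]) (stack ++ [v]) vs
    else pushNbrs remSet seen stack vs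

-- measure fact for the DFS while-loop, cited in its decreasing_by
theorem pvPushNbrs_measure (remSet : List Int) :
    ∀ (nbrs seen stack : List Int),
      2 * (remSet.filter (fun x => decide (¬ x ∈ (pushNbrs remSet seen stack nbrs).1))).length
        + (pushNbrs remSet seen stack nbrs).2.length
      ≤ 2 * (remSet.filter (fun x => decide (¬ x ∈ seen))).length + stack.length := by
  intro nbrs
  induction nbrs with
  | nil => intro seen stack; simp [pushNbrs]
  | cons v vs ih =>
    intro seen stack
    by_cases hc : v ∈ remSet ∧ ¬ v ∈ seen
    · rw [pushNbrs, if_pos hc]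
      have h1 := ih (seen ++ [v]) (stack ++ [v])
      have h2 : (remSet.filter (fun x => decide (¬ x ∈ seen ++ [v]))).length <
          (remSet.filter (fun x => decide (¬ x ∈ seen))).length := by
        refine pvFilterStrict _ _ ?_ v ?_ ?_ remSet hc.1
        · intro x hx; simp at hx ⊢; exact hx.1
        · simpa using hc.2
        · simp
      simp only [List.length_append, List.length_cons, List.length_nil] at h1 ⊢
      omega
    · rw [pushNbrs, if_neg hc]
      exact ih seen stack

-- while stack: u = stack.pop() (last element); push unseen remaining neighbours; comp_size += 1
def dfsLoop (adj : List (List Int)) (remSet : List Int) (seen stack : List Int) (cnt : Int) :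
    List Int × Int :=
  if h : stack = [] then (seen, cnt)
  else
    let u := stack.getLast h
    let p := pushNbrs remSet seen stack.dropLast ((PySem.List.pyGet? adj u).getD [])
    dfsLoop adj remSet p.1 p.2 (cnt + 1)
termination_by 2 * (remSet.filter (fun x => decide (¬ x ∈ seen))).length + stack.length
decreasing_by
  have h1 := pvPushNbrs_measure remSet ((PySem.List.pyGet? adj (stack.getLast h)).getD [])
      seen stack.dropLast
  have h2 : stack.dropLast.length = stack.length - 1 := by simp
  have h3 : 1 ≤ stack.length := List.length_pos_iff.2 h
  omega

-- for start in remaining: skip seen starts, else DFS one component and record its size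
def outerA (adj : List (List Int)) (remSet : List Int) : List Int → List Int → List Int → List Int
  | [], _seen, sizes => sizes
  | start :: rest, seen, sizes =>
    if start ∈ seen then outerA adj remSet rest seen sizes
    else
      let r := dfsLoop adj remSet (seen ++ [start]) [start] 0
      outerA adj remSet rest r.1 (sizes ++ [r.2])

def component_sizes (adj : List (List Int)) (removed : List Int) : List Int :=
  let n : Int := adj.length
  let remaining := (PySem.List.pyRange 0 n 1).filter (fun v => decide (¬ v ∈ removed))
  if remaining = [] then []
  else
    let remSet : PySem.Set Int := PySem.Set.ofList remaining
    PySem.List.sorted (outerA adj remSet remaining [] []) (fun x => x) true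

-- ===== PORT B =====
-- seen.add(x) on a set not containing x is an append (helper cited by the measure lemma below)
theorem pv_add_not_mem (s : List Int) (x : Int) (h : ¬ x ∈ s) :
    PySem.Set.add s x = s ++ [x] := by
  unfold PySem.Set.add
  rw [if_neg (fun hc => h ((PySem.Set.contains_iff s x).1 hc))]

-- 'for w in adj[order[i]]: if w in rem and w not in seen: seen.add(w); order.append(w)'
def scanRow (rem : List Int) (st : List Int × List Int) (row : List Int) : List Int × List Int :=
  row.foldl
    (fun st w =>
      if w ∈ rem ∧ ¬ w ∈ st.1 then (PySem.Set.add st.1 w, st.2 ++ [w]) else st) st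

-- two measure facts for the while-loop below, cited in its decreasing_by
theorem pvScan_measure (rem : List Int) :
    ∀ (row seen order : List Int),
      2 * (rem.filter (fun x => decide (¬ x ∈ (scanRow rem (seen, order) row).1))).length
        + (scanRow rem (seen, order) row).2.length
      ≤ 2 * (rem.filter (fun x => decide (¬ x ∈ seen))).length + order.length := by
  intro row
  induction row with
  | nil => intro seen order; simp [scanRow]
  | cons w ws ih =>
    intro seen order
    by_cases hc : w ∈ rem ∧ ¬ w ∈ seen
    · have hstep : scanRow rem (seen, order) (w :: ws) =
          scanRow rem (seen ++ [w], order ++ [w]) ws := by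
        simp only [scanRow, List.foldl_cons, if_pos hc, pv_add_not_mem seen w hc.2]
      rw [hstep]
      have h1 := ih (seen ++ [w]) (order ++ [w])
      have h2 : (rem.filter (fun x => decide (¬ x ∈ seen ++ [w]))).length <
          (rem.filter (fun x => decide (¬ x ∈ seen))).length := by
        refine pvFilterStrict _ _ ?_ w ?_ ?_ rem hc.1
        · intro x hx; simp at hx ⊢; exact hx.1
        · simpa using hc.2
        · simp
      simp only [List.length_append, List.length_cons, List.length_nil] at h1 ⊢
      omega
    · have hstep : scanRow rem (seen, order) (w :: ws) = scanRow rem (seen, order) ws := by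
        simp only [scanRow, List.foldl_cons, if_neg hc]
      rw [hstep]
      exact ih seen order

theorem pvScan_order_len (rem : List Int) :
    ∀ (row seen order : List Int),
      order.length ≤ (scanRow rem (seen, order) row).2.length := by
  intro row
  induction row with
  | nil => intro seen order; simp [scanRow]
  | cons w ws ih =>
    intro seen order
    by_cases hc : w ∈ rem ∧ ¬ w ∈ seen
    · have hstep : scanRow rem (seen, order) (w :: ws) =
          scanRow rem (seen ++ [w], order ++ [w]) ws := by
        simp only [scanRow, List.foldl_cons, if_pos hc, pv_add_not_mem seen w hc.2]
      rw [hstep]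
      have := ih (seen ++ [w]) (order ++ [w])
      simp only [List.length_append, List.length_cons, List.length_nil] at this
      omega
    · have hstep : scanRow rem (seen, order) (w :: ws) = scanRow rem (seen, order) ws := by
        simp only [scanRow, List.foldl_cons, if_neg hc]
      rw [hstep]
      exact ih seen order

-- while i < len(order): scan adj[order[i]]; i += 1   (order is the visited-order list)
def bfsIdx (adj : List (List Int)) (rem : List Int) (seen order : List Int) (i : Nat) :
    List Int × List Int :=
  if h : i < order.length then
    bfsIdx adj rem (scanRow rem (seen, order) ((PySem.List.pyGet? adj order[i]).getD [])).1
      (scanRow rem (seen, order) ((PySem.List.pyGet? adj order[i]).getD [])).2 (i + 1)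
  else (seen, order)
termination_by 2 * (rem.filter (fun x => decide (¬ x ∈ seen))).length + (order.length - i)
decreasing_by
  have h1 := pvScan_measure rem ((PySem.List.pyGet? adj order[i]).getD []) seen order
  have h2 := pvScan_order_len rem ((PySem.List.pyGet? adj order[i]).getD []) seen order
  omega

-- for start in range(n): if start in rem and start not in seen: grow one component
def outerB (adj : List (List Int)) (rem : List Int) :
    List Int → List Int → List (List Int) → List (List Int)
  | [], _seen, comps => comps
  | s :: rest, seen, comps =>
    if s ∈ rem ∧ ¬ s ∈ seen then
      let st := bfsIdx adj rem (PySem.Set.add seen s) [s] 0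
      outerB adj rem rest st.1 (comps ++ [st.2])
    else outerB adj rem rest seen comps

def component_sizes_alt (adj : List (List Int)) (removed : List Int) : List Int :=
  let n : Int := adj.length
  let rem : PySem.Set Int :=
    PySem.Set.diff (PySem.Set.ofList (PySem.List.pyRange 0 n 1)) (PySem.Set.ofList removed)
  let comps := outerB adj rem (PySem.List.pyRange 0 n 1) [] []
  PySem.List.sorted (comps.map (fun c => (c.length : Int))) (fun x => x) true

-- ===== PRECONDITION & SPEC =====
def Spec_component_sizes (adj : List (List Int)) (removed : List Int) (out : List Int) : Prop := out = component_sizes_alt adj removed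
instance (adj : List (List Int)) (removed : List Int) (out : List Int) : Decidable (Spec_component_sizes adj removed out) := by unfold Spec_component_sizes; infer_instance

-- ===== CLAIM (what is proved, stated in full; the proofs are below) =====
def Claim_equal_component_sizes : Prop := ∀ (adj : List (List Int)) (removed : List Int), Dom_component_sizes adj removed → Spec_component_sizes adj removed (component_sizes adj removed)

-- ===== LEMMAS AND PROOFS =====

-- v is a neighbour of u that survives the remaining-set filter
def NbP (adj : List (List Int)) (remSet : List Int) (u v : Int) : Prop :=
  v ∈ (PySem.List.pyGet? adj u).getD [] ∧ v ∈ remSet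

-- reachability from a base predicate S along NbP edges
inductive ReachP (adj : List (List Int)) (remSet : List Int) (S : Int → Prop) : Int → Prop
  | base {v : Int} : S v → ReachP adj remSet S v
  | step {u v : Int} : ReachP adj remSet S u → NbP adj remSet u v → ReachP adj remSet S v

theorem reach_mono {adj : List (List Int)} {remSet : List Int} {S T : Int → Prop}
    (h : ∀ x, S x → T x) {v : Int} (hr : ReachP adj remSet S v) : ReachP adj remSet T v := by
  induction hr with
  | base h' => exact .base (h _ h')
  | step _ hnb ih => exact .step ih hnb

theorem reach_congr {adj : List (List Int)} {r1 r2 : List Int}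
    (h : ∀ x, x ∈ r1 ↔ x ∈ r2) {S : Int → Prop} {v : Int}
    (hr : ReachP adj r1 S v) : ReachP adj r2 S v := by
  induction hr with
  | base h' => exact .base h'
  | step _ hnb ih => exact .step ih ⟨hnb.1, (h _).1 hnb.2⟩

theorem reach_closed {adj : List (List Int)} {remSet : List Int} {S P : Int → Prop}
    (hS : ∀ x, S x → P x) (hcl : ∀ u v, P u → NbP adj remSet u v → P v)
    {v : Int} (hr : ReachP adj remSet S v) : P v := by
  induction hr with
  | base h' => exact hS _ h'
  | step _ hnb ih => exact hcl _ _ ih hnb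

theorem reach_trans {adj : List (List Int)} {remSet : List Int} {S T : Int → Prop}
    {v : Int} (hr : ReachP adj remSet T v) (h : ∀ x, T x → ReachP adj remSet S x) :
    ReachP adj remSet S v := by
  induction hr with
  | base h' => exact h _ h'
  | step _ hnb ih => exact .step ih hnb

theorem pv_nodup_length_eq {l1 l2 : List Int} (h1 : l1.Nodup) (h2 : l2.Nodup)
    (h : ∀ x, x ∈ l1 ↔ x ∈ l2) : l1.length = l2.length :=
  ((List.perm_ext_iff_of_nodup h1 h2).2 h).length_eq

theorem pushNbrs_spec (remSet : List Int) :
    ∀ (nbrs seen stack : List Int),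
      ∃ d, pushNbrs remSet seen stack nbrs = (seen ++ d, stack ++ d) ∧
        (∀ x ∈ d, x ∈ nbrs ∧ x ∈ remSet) ∧
        (∀ x, x ∈ seen ++ d ↔ x ∈ seen ∨ (x ∈ nbrs ∧ x ∈ remSet)) ∧
        (seen.Nodup → (seen ++ d).Nodup) := by
  intro nbrs
  induction nbrs with
  | nil =>
    intro seen stack
    refine ⟨[], by simp [pushNbrs], by simp, ?_, by simp⟩
    intro x; simp
  | cons v vs ih =>
    intro seen stack
    by_cases hc : v ∈ remSet ∧ ¬ v ∈ seen
    · obtain ⟨d, hres, hsub, hmem, hnd⟩ := ih (seen ++ [v]) (stack ++ [v])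
      refine ⟨v :: d, ?_, ?_, ?_, ?_⟩
      · rw [pushNbrs, if_pos hc, hres]; simp
      · intro x hx
        rcases List.mem_cons.1 hx with rfl | hx'
        · exact ⟨List.mem_cons_self .., hc.1⟩
        · exact ⟨List.mem_cons_of_mem _ (hsub x hx').1, (hsub x hx').2⟩
      · intro x
        rw [show seen ++ v :: d = (seen ++ [v]) ++ d by simp, hmem x]
        simp only [List.mem_append, List.mem_cons, List.not_mem_nil, or_false]
        constructor
        · rintro ((hx | rfl) | ⟨hx, hr⟩)
          · exact Or.inl hx
          · exact Or.inr ⟨Or.inl rfl, hc.1⟩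
          · exact Or.inr ⟨Or.inr hx, hr⟩
        · rintro (hx | ⟨rfl | hx, hr⟩)
          · exact Or.inl (Or.inl hx)
          · exact Or.inl (Or.inr rfl)
          · exact Or.inr ⟨hx, hr⟩
      · intro hnodup
        have hstep : (seen ++ [v]).Nodup := by
          rw [List.nodup_append]
          refine ⟨hnodup, List.nodup_singleton _, ?_⟩
          intro a ha b hb e
          rcases List.mem_singleton.1 hb with rfl
          exact hc.2 (e ▸ ha)
        have := hnd hstep
        rwa [show (seen ++ [v]) ++ d = seen ++ v :: d by simp] at this
    · obtain ⟨d, hres, hsub, hmem, hnd⟩ := ih seen stack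
      refine ⟨d, by rw [pushNbrs, if_neg hc]; exact hres, ?_, ?_, hnd⟩
      · intro x hx; exact ⟨List.mem_cons_of_mem _ (hsub x hx).1, (hsub x hx).2⟩
      · intro x
        rw [hmem x]
        constructor
        · rintro (h | h)
          · exact Or.inl h
          · exact Or.inr ⟨List.mem_cons_of_mem _ h.1, h.2⟩
        · rintro (h | ⟨h1, h2⟩)
          · exact Or.inl h
          · rcases List.mem_cons.1 h1 with rfl | h1'
            · left
              by_contra hns
              exact hc ⟨h2, hns⟩
            · exact Or.inr ⟨h1', h2⟩

theorem dfsLoop_spec (adj : List (List Int)) (remSet : List Int) :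
    ∀ (seen stack : List Int) (cnt : Int),
      (∀ x ∈ stack, x ∈ seen) → seen.Nodup →
      (∀ u ∈ seen, ¬ u ∈ stack → ∀ v, NbP adj remSet u v → v ∈ seen) →
      ∃ d, (dfsLoop adj remSet seen stack cnt).1 = seen ++ d ∧
        (dfsLoop adj remSet seen stack cnt).2 = cnt + stack.length + d.length ∧
        (seen ++ d).Nodup ∧
        (∀ u ∈ seen ++ d, ∀ v, NbP adj remSet u v → v ∈ seen ++ d) ∧
        (∀ x ∈ d, ReachP adj remSet (fun y => y ∈ stack) x) := by
  intro seen stack cnt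
  induction seen, stack, cnt using dfsLoop.induct adj remSet with
  | case1 seen cnt =>
    intro _ hnd hcl
    refine ⟨[], ?_, ?_, by simpa using hnd, ?_, by intro x hx; cases hx⟩
    · rw [dfsLoop]; simp
    · rw [dfsLoop]; simp
    · intro u hu v hnb
      simp only [List.append_nil] at hu ⊢
      exact hcl u hu (by simp) v hnb
  | case2 seen stack cnt h u p ih =>
    intro hsub hnd hcl
    obtain ⟨dp, hres, hpsub, hpmem, hpnd⟩ :=
      pushNbrs_spec remSet ((PySem.List.pyGet? adj (stack.getLast h)).getD []) seen
        stack.dropLast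
    have hstackeq : stack.dropLast ++ [stack.getLast h] = stack :=
      List.dropLast_append_getLast h
    have hp : p = (seen ++ dp, stack.dropLast ++ dp) := hres
    simp only [hp] at ih
    have h1' : ∀ x ∈ stack.dropLast ++ dp, x ∈ seen ++ dp := by
      intro x hx
      rcases List.mem_append.1 hx with hx' | hx'
      · exact List.mem_append.2 (Or.inl (hsub x ((List.dropLast_sublist stack).subset hx')))
      · exact List.mem_append.2 (Or.inr hx')
    have h2' : (seen ++ dp).Nodup := hpnd hnd
    have h3' : ∀ u ∈ seen ++ dp, ¬ u ∈ stack.dropLast ++ dp →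
        ∀ v, NbP adj remSet u v → v ∈ seen ++ dp := by
      intro u' hu' hnu' v hnb
      have hu'dp : ¬ u' ∈ dp := fun hx => hnu' (List.mem_append.2 (Or.inr hx))
      have hu'seen : u' ∈ seen := by
        rcases List.mem_append.1 hu' with h' | h'
        · exact h'
        · exact absurd h' hu'dp
      by_cases huu : u' = stack.getLast h
      · subst huu
        exact (hpmem v).2 (Or.inr ⟨hnb.1, hnb.2⟩)
      · have hu'stack : ¬ u' ∈ stack := by
          intro hx
          rw [← hstackeq] at hx
          rcases List.mem_append.1 hx with h' | h'
          · exact hnu' (List.mem_append.2 (Or.inl h'))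
          · exact huu (List.mem_singleton.1 h')
        exact List.mem_append.2 (Or.inl (hcl u' hu'seen hu'stack v hnb))
    obtain ⟨d', k1, k2, k3, k4, k5⟩ := ih h1' h2' h3'
    have hreach_dp : ∀ x ∈ dp, ReachP adj remSet (fun y => y ∈ stack) x := by
      intro x hx
      exact .step (.base (List.getLast_mem h)) ⟨(hpsub x hx).1, (hpsub x hx).2⟩
    refine ⟨dp ++ d', ?_, ?_, ?_, ?_, ?_⟩
    · rw [dfsLoop, dif_neg h]
      simp only [hres]
      rw [k1, List.append_assoc]
    · rw [dfsLoop, dif_neg h]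
      simp only [hres]
      rw [k2]
      have hlen : 1 ≤ stack.length := List.length_pos_iff.2 h
      have hdl : stack.dropLast.length = stack.length - 1 := by simp
      simp only [List.length_append, hdl]
      push_cast
      omega
    · rw [← List.append_assoc]; exact k3
    · rw [← List.append_assoc]; exact k4
    · intro x hx
      rcases List.mem_append.1 hx with hx' | hx'
      · exact hreach_dp x hx'
      · refine reach_trans (k5 x hx') ?_
        intro t ht
        rcases List.mem_append.1 ht with ht' | ht'
        · exact .base ((List.dropLast_sublist stack).subset ht')
        · exact hreach_dp t ht'

-- scanRow appends one block d to both the seen set and the visited-order list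
theorem scanRow_spec (rem : List Int) :
    ∀ (row seen order : List Int),
      ∃ d, scanRow rem (seen, order) row = (seen ++ d, order ++ d) ∧
        (∀ x ∈ d, x ∈ row ∧ x ∈ rem) ∧
        (∀ x, x ∈ seen ++ d ↔ x ∈ seen ∨ (x ∈ row ∧ x ∈ rem)) ∧
        (seen.Nodup → (seen ++ d).Nodup) := by
  intro row
  induction row with
  | nil =>
    intro seen order
    refine ⟨[], by simp [scanRow], by simp, ?_, by simp⟩
    intro x; simp
  | cons w ws ih =>
    intro seen order
    by_cases hc : w ∈ rem ∧ ¬ w ∈ seen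
    · have hstep : scanRow rem (seen, order) (w :: ws) =
          scanRow rem (seen ++ [w], order ++ [w]) ws := by
        simp only [scanRow, List.foldl_cons, if_pos hc, pv_add_not_mem seen w hc.2]
      obtain ⟨d, hres, hsub, hmem, hnd⟩ := ih (seen ++ [w]) (order ++ [w])
      refine ⟨w :: d, ?_, ?_, ?_, ?_⟩
      · rw [hstep, hres]; simp
      · intro x hx
        rcases List.mem_cons.1 hx with rfl | hx'
        · exact ⟨List.mem_cons_self .., hc.1⟩
        · exact ⟨List.mem_cons_of_mem _ (hsub x hx').1, (hsub x hx').2⟩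
      · intro x
        rw [show seen ++ w :: d = (seen ++ [w]) ++ d by simp, hmem x]
        simp only [List.mem_append, List.mem_cons, List.not_mem_nil, or_false]
        constructor
        · rintro ((hx | rfl) | ⟨hx, hr⟩)
          · exact Or.inl hx
          · exact Or.inr ⟨Or.inl rfl, hc.1⟩
          · exact Or.inr ⟨Or.inr hx, hr⟩
        · rintro (hx | ⟨rfl | hx, hr⟩)
          · exact Or.inl (Or.inl hx)
          · exact Or.inl (Or.inr rfl)
          · exact Or.inr ⟨hx, hr⟩
      · intro hnodup
        have hstep' : (seen ++ [w]).Nodup := by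
          rw [List.nodup_append]
          refine ⟨hnodup, List.nodup_singleton _, ?_⟩
          intro a ha b hb e
          rcases List.mem_singleton.1 hb with rfl
          exact hc.2 (e ▸ ha)
        have := hnd hstep'
        rwa [show (seen ++ [w]) ++ d = seen ++ w :: d by simp] at this
    · have hstep : scanRow rem (seen, order) (w :: ws) = scanRow rem (seen, order) ws := by
        simp only [scanRow, List.foldl_cons, if_neg hc]
      obtain ⟨d, hres, hsub, hmem, hnd⟩ := ih seen order
      refine ⟨d, by rw [hstep]; exact hres, ?_, ?_, hnd⟩
      · intro x hx; exact ⟨List.mem_cons_of_mem _ (hsub x hx).1, (hsub x hx).2⟩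
      · intro x
        rw [hmem x]
        constructor
        · rintro (h | h)
          · exact Or.inl h
          · exact Or.inr ⟨List.mem_cons_of_mem _ h.1, h.2⟩
        · rintro (h | ⟨h1, h2⟩)
          · exact Or.inl h
          · rcases List.mem_cons.1 h1 with rfl | h1'
            · left
              by_contra hns
              exact hc ⟨h2, hns⟩
            · exact Or.inr ⟨h1', h2⟩

-- the index-pointer BFS grows seen and order by one common block d
theorem bfsIdx_spec (adj : List (List Int)) (rem : List Int) :
    ∀ (seen order : List Int) (i : Nat),
      (∀ x ∈ order.drop i, x ∈ seen) → seen.Nodup →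
      (∀ u ∈ seen, ¬ u ∈ order.drop i → ∀ v, NbP adj rem u v → v ∈ seen) →
      ∃ d, bfsIdx adj rem seen order i = (seen ++ d, order ++ d) ∧
        (seen ++ d).Nodup ∧
        (∀ u ∈ seen ++ d, ∀ v, NbP adj rem u v → v ∈ seen ++ d) ∧
        (∀ x ∈ d, ReachP adj rem (fun y => y ∈ order.drop i) x) := by
  intro seen order i
  induction seen, order, i using bfsIdx.induct adj rem with
  | case2 seen order i h =>
    intro _ hnd hcl
    have hdrop : order.drop i = [] := List.drop_eq_nil_of_le (by omega)
    refine ⟨[], ?_, by simpa using hnd, ?_, by intro x hx; cases hx⟩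
    · rw [bfsIdx, dif_neg h]; simp
    · intro u hu v hnb
      simp only [List.append_nil] at hu ⊢
      exact hcl u hu (by rw [hdrop]; simp) v hnb
  | case1 seen order i h ih =>
    intro hsub hnd hcl
    obtain ⟨d0, hres, hssub, hsmem, hsnd⟩ :=
      scanRow_spec rem ((PySem.List.pyGet? adj order[i]).getD []) seen order
    have hdropi : order.drop i = order[i] :: order.drop (i + 1) :=
      List.drop_eq_getElem_cons h
    have hui : order[i] ∈ order.drop i := by rw [hdropi]; exact List.mem_cons_self ..
    simp only [hres] at ih
    have hdrop' : (order ++ d0).drop (i + 1) = order.drop (i + 1) ++ d0 :=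
      List.drop_append_of_le_length (by omega)
    have h1' : ∀ x ∈ (order ++ d0).drop (i + 1), x ∈ seen ++ d0 := by
      rw [hdrop']
      intro x hx
      rcases List.mem_append.1 hx with hx' | hx'
      · exact List.mem_append.2 (Or.inl (hsub x (by rw [hdropi]; exact List.mem_cons_of_mem _ hx')))
      · exact List.mem_append.2 (Or.inr hx')
    have h2' : (seen ++ d0).Nodup := hsnd hnd
    have h3' : ∀ u ∈ seen ++ d0, ¬ u ∈ (order ++ d0).drop (i + 1) →
        ∀ v, NbP adj rem u v → v ∈ seen ++ d0 := by
      rw [hdrop']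
      intro u' hu' hnu' v hnb
      have hu'd0 : ¬ u' ∈ d0 := fun hx => hnu' (List.mem_append.2 (Or.inr hx))
      have hu'seen : u' ∈ seen := by
        rcases List.mem_append.1 hu' with h' | h'
        · exact h'
        · exact absurd h' hu'd0
      by_cases huu : u' = order[i]
      · subst huu
        exact (hsmem v).2 (Or.inr ⟨hnb.1, hnb.2⟩)
      · have hu'drop : ¬ u' ∈ order.drop i := by
          rw [hdropi]
          intro hx
          rcases List.mem_cons.1 hx with h' | h'
          · exact huu h'
          · exact hnu' (List.mem_append.2 (Or.inl h'))
        exact List.mem_append.2 (Or.inl (hcl u' hu'seen hu'drop v hnb))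
    obtain ⟨d', k1, k2, k3, k4⟩ := ih h1' h2' h3'
    have hreach_d0 : ∀ x ∈ d0, ReachP adj rem (fun y => y ∈ order.drop i) x := by
      intro x hx
      exact .step (.base hui) ⟨(hssub x hx).1, (hssub x hx).2⟩
    refine ⟨d0 ++ d', ?_, ?_, ?_, ?_⟩
    · rw [bfsIdx, dif_pos h]
      simp only [hres]
      rw [k1]
      simp [List.append_assoc]
    · rw [← List.append_assoc]; exact k2
    · rw [← List.append_assoc]; exact k3
    · intro x hx
      rcases List.mem_append.1 hx with hx' | hx'
      · exact hreach_d0 x hx'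
      · refine reach_trans (k4 x hx') ?_
        rw [hdrop']
        intro t ht
        rcases List.mem_append.1 ht with ht' | ht'
        · exact .base (by rw [hdropi]; exact List.mem_cons_of_mem _ ht')
        · exact hreach_d0 t ht'

-- if no start qualifies, outerB returns the accumulated components unchanged
theorem outerB_none (adj : List (List Int)) (rem : List Int) :
    ∀ (starts seen : List Int) (comps : List (List Int)),
      (∀ s ∈ starts, ¬ s ∈ rem) →
      outerB adj rem starts seen comps = comps := by
  intro starts
  induction starts with
  | nil => intro seen comps _; rfl
  | cons s rest ih =>
    intro seen comps hno
    rw [outerB, if_neg (fun hc => hno s (List.mem_cons_self ..) hc.1)]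
    exact ih seen comps (fun t ht => hno t (List.mem_cons_of_mem _ ht))

theorem outer_eq (adj : List (List Int)) (remA remB : List Int)
    (hrm : ∀ x, x ∈ remA ↔ x ∈ remB) :
    ∀ (starts seenA seenB sizes : List Int) (comps : List (List Int)),
      (∀ x, x ∈ seenA ↔ x ∈ seenB) → seenA.Nodup → seenB.Nodup →
      (∀ u ∈ seenA, ∀ v, NbP adj remA u v → v ∈ seenA) →
      sizes = comps.map (fun c => (c.length : Int)) →
      outerA adj remA (starts.filter (fun v => decide (v ∈ remA))) seenA sizes
        = (outerB adj remB starts seenB comps).map (fun c => (c.length : Int)) := by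
  intro starts
  induction starts with
  | nil =>
    intro seenA seenB sizes comps _ _ _ _ hsz
    simpa [outerA, outerB] using hsz
  | cons s rest ih =>
    intro seenA seenB sizes comps hiff hndA hndB hclA hsz
    by_cases hsr : s ∈ remA
    · rw [List.filter_cons, if_pos (by simpa using hsr)]
      by_cases hs : s ∈ seenA
      · rw [outerA, if_pos hs, outerB,
          if_neg (fun hc => hc.2 ((hiff s).1 hs))]
        exact ih seenA seenB sizes comps hiff hndA hndB hclA hsz
      · have hsB : ¬ s ∈ seenB := fun h => hs ((hiff s).2 h)
        have hadd : PySem.Set.add seenB s = seenB ++ [s] := pv_add_not_mem seenB s hsB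
        obtain ⟨dA, hA1, hA2, hA3, hA4, hA5⟩ := dfsLoop_spec adj remA (seenA ++ [s]) [s] 0
          (by
            intro x hx
            rcases List.mem_singleton.1 hx with rfl
            exact List.mem_append.2 (Or.inr (List.mem_singleton.2 rfl)))
          (by
            rw [List.nodup_append]
            refine ⟨hndA, List.nodup_singleton _, ?_⟩
            intro a ha b hb e
            rcases List.mem_singleton.1 hb with rfl
            exact hs (e ▸ ha))
          (by
            intro u hu hnu v hnb
            rcases List.mem_append.1 hu with hu' | hu'
            · exact List.mem_append.2 (Or.inl (hclA u hu' v hnb))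
            · exact absurd hu' hnu)
        obtain ⟨dB, hB1, hB2, hB3, hB4⟩ := bfsIdx_spec adj remB (seenB ++ [s]) [s] 0
          (by
            intro x hx
            rcases List.mem_singleton.1 hx with rfl
            exact List.mem_append.2 (Or.inr (List.mem_singleton.2 rfl)))
          (by
            rw [List.nodup_append]
            refine ⟨hndB, List.nodup_singleton _, ?_⟩
            intro a ha b hb e
            rcases List.mem_singleton.1 hb with rfl
            exact hsB (e ▸ ha))
          (by
            intro u hu hnu v hnb
            rcases List.mem_append.1 hu with hu' | hu'
            · have huA : u ∈ seenA := (hiff u).2 hu'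
              have : v ∈ seenA := hclA u huA v ⟨hnb.1, (hrm v).2 hnb.2⟩
              exact List.mem_append.2 (Or.inl ((hiff v).1 this))
            · exact absurd hu' hnu)
        -- dB disjoint from seenB ++ [s]
        have hdisjB : ∀ x ∈ dB, ¬ x ∈ seenB ++ [s] := by
          intro x hx hx'
          exact ((List.nodup_append.1 hB2).2.2 x hx' x hx) rfl
        -- dA disjoint from seenA ++ [s]
        have hdisjA : ∀ x ∈ dA, ¬ x ∈ seenA ++ [s] := by
          intro x hx hx'
          exact ((List.nodup_append.1 hA3).2.2 x hx' x hx) rfl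
        -- membership of A's enlarged seen set
        have memA : ∀ x, x ∈ (seenA ++ [s]) ++ dA ↔
            ReachP adj remA (fun y => y ∈ seenA ∨ y = s) x := by
          intro x
          constructor
          · intro hx
            rcases List.mem_append.1 hx with hx' | hx'
            · rcases List.mem_append.1 hx' with h | h
              · exact .base (Or.inl h)
              · rcases List.mem_singleton.1 h with rfl
                exact .base (Or.inr rfl)
            · exact reach_mono (by
                rintro y hy
                rcases List.mem_singleton.1 hy with rfl
                exact Or.inr rfl) (hA5 x hx')
          · intro hx
            refine reach_closed ?_ ?_ hx
            · rintro y (hy | rfl)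
              · exact List.mem_append.2 (Or.inl (List.mem_append.2 (Or.inl hy)))
              · exact List.mem_append.2 (Or.inl (List.mem_append.2 (Or.inr (List.mem_singleton.2 rfl))))
            · intro u v hu hnb
              exact hA4 u hu v hnb
        -- membership of B's component [s] ++ dB
        have memC : ∀ x, x ∈ [s] ++ dB ↔
            (ReachP adj remA (fun y => y ∈ seenA ∨ y = s) x ∧ ¬ x ∈ seenA) := by
          intro x
          constructor
          · intro hx
            refine ⟨?_, ?_⟩
            · rcases List.mem_append.1 hx with h | h
              · rcases List.mem_singleton.1 h with rfl
                exact .base (Or.inr rfl)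
              · refine reach_mono (by
                  rintro y hy
                  rcases List.mem_singleton.1 hy with rfl
                  exact Or.inr rfl) (reach_congr (fun t => (hrm t).symm) (hB4 x h))
            · intro hxA
              rcases List.mem_append.1 hx with h | h
              · rcases List.mem_singleton.1 h with rfl
                exact hs hxA
              · exact hdisjB x h (List.mem_append.2 (Or.inl ((hiff x).1 hxA)))
          · rintro ⟨hr, hxA⟩
            have hor : x ∈ seenA ∨ x ∈ [s] ++ dB := by
              refine reach_closed (P := fun y => y ∈ seenA ∨ y ∈ [s] ++ dB) ?_ ?_ hr
              · rintro y (hy | rfl)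
                · exact Or.inl hy
                · exact Or.inr (List.mem_append.2 (Or.inl (List.mem_singleton.2 rfl)))
              · intro u v hu hnb
                rcases hu with hu | hu
                · exact Or.inl (hclA u hu v hnb)
                · have hu' : u ∈ (seenB ++ [s]) ++ dB := by
                    rcases List.mem_append.1 hu with h' | h'
                    · exact List.mem_append.2 (Or.inl (List.mem_append.2 (Or.inr h')))
                    · exact List.mem_append.2 (Or.inr h')
                  have hv := hB3 u hu' v ⟨hnb.1, (hrm v).1 hnb.2⟩
                  rcases List.mem_append.1 hv with h' | h'
                  · rcases List.mem_append.1 h' with h'' | h''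
                    · exact Or.inl ((hiff v).2 h'')
                    · exact Or.inr (List.mem_append.2 (Or.inl h''))
                  · exact Or.inr (List.mem_append.2 (Or.inr h'))
            rcases hor with h | h
            · exact absurd h hxA
            · exact h
        -- membership of A's component [s] ++ dA
        have memLA : ∀ x, x ∈ ([s] : List Int) ++ dA ↔
            (ReachP adj remA (fun y => y ∈ seenA ∨ y = s) x ∧ ¬ x ∈ seenA) := by
          intro x
          constructor
          · intro hx
            rcases List.mem_append.1 hx with h | h
            · rcases List.mem_singleton.1 h with rfl
              exact ⟨.base (Or.inr rfl), hs⟩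
            · refine ⟨(memA x).1 (List.mem_append.2 (Or.inr h)), ?_⟩
              intro hxA
              exact hdisjA x h (List.mem_append.2 (Or.inl hxA))
          · rintro ⟨hr, hxA⟩
            rcases List.mem_append.1 ((memA x).2 hr) with h | h
            · rcases List.mem_append.1 h with h' | h'
              · exact absurd h' hxA
              · exact List.mem_append.2 (Or.inl h')
            · exact List.mem_append.2 (Or.inr h)
        have hndLA : (([s] : List Int) ++ dA).Nodup := by
          rw [List.nodup_append]
          refine ⟨List.nodup_singleton _, (List.nodup_append.1 hA3).2.1, ?_⟩
          intro a ha b hb e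
          have ea : a = s := List.mem_singleton.1 ha
          exact hdisjA b hb
            (List.mem_append.2 (Or.inr (List.mem_singleton.2 (ea.symm.trans e).symm)))
        have hndLB : (([s] : List Int) ++ dB).Nodup := by
          rw [List.nodup_append]
          refine ⟨List.nodup_singleton _, (List.nodup_append.1 hB2).2.1, ?_⟩
          intro a ha b hb e
          have ea : a = s := List.mem_singleton.1 ha
          exact hdisjB b hb
            (List.mem_append.2 (Or.inr (List.mem_singleton.2 (ea.symm.trans e).symm)))
        have hlen : (([s] : List Int) ++ dA).length = (([s] : List Int) ++ dB).length :=
          pv_nodup_length_eq hndLA hndLB (fun x => (memLA x).trans (memC x).symm)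
        -- the invariant for the recursive call
        have hiff' : ∀ x, x ∈ (seenA ++ [s]) ++ dA ↔ x ∈ (seenB ++ [s]) ++ dB := by
          intro x
          rw [memA x]
          constructor
          · intro hr
            by_cases hxA : x ∈ seenA
            · exact List.mem_append.2 (Or.inl (List.mem_append.2 (Or.inl ((hiff x).1 hxA))))
            · rcases List.mem_append.1 ((memC x).2 ⟨hr, hxA⟩) with h | h
              · rcases List.mem_singleton.1 h with rfl
                exact List.mem_append.2 (Or.inl (List.mem_append.2 (Or.inr (List.mem_singleton.2 rfl))))
              · exact List.mem_append.2 (Or.inr h)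
          · intro hx
            rcases List.mem_append.1 hx with h | h
            · rcases List.mem_append.1 h with h' | h'
              · exact .base (Or.inl ((hiff x).2 h'))
              · rcases List.mem_singleton.1 h' with rfl
                exact .base (Or.inr rfl)
            · exact ((memC x).1 (List.mem_append.2 (Or.inr h))).1
        rw [outerA, if_neg hs, outerB, if_pos ⟨(hrm s).1 hsr, hsB⟩]
        simp only [hadd]
        rw [hA1, hA2, hB1]
        have hsz' : sizes ++ [(0 : Int) + (([s] : List Int).length : Int) + (dA.length : Int)] =
            (comps ++ [[s] ++ dB]).map (fun c => (c.length : Int)) := by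
          rw [List.map_append, ← hsz]
          have := hlen
          simp only [List.length_append, List.length_cons, List.length_nil,
            List.map_cons, List.map_nil] at this ⊢
          congr 2
          push_cast
          omega
        rw [show (0 : Int) + (([s] : List Int).length : Int) + (dA.length : Int)
              = 0 + 1 + (dA.length : Int) by norm_num] at hsz'
        exact ih _ _ _ _ hiff' hA3 hB2 hA4 (by simpa using hsz')
    · rw [List.filter_cons, if_neg (by simpa using hsr), outerB,
        if_neg (fun hc => hsr ((hrm s).2 hc.1))]
      exact ih seenA seenB sizes comps hiff hndA hndB hclA hsz

-- ===== VERDICT (by name: the statement is the Claim_ definition above) =====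
theorem component_sizes_spec : Claim_equal_component_sizes := by
  intro adj removed _hdom
  unfold Spec_component_sizes component_sizes component_sizes_alt
  simp only []
  set n : Int := (adj.length : Int) with hn
  set rng := PySem.List.pyRange 0 n 1 with hrng
  set remaining := rng.filter (fun v => decide (¬ v ∈ removed)) with hrem
  set remB := PySem.Set.diff (PySem.Set.ofList rng) (PySem.Set.ofList removed) with hremB
  have hmemB : ∀ x, x ∈ remB ↔ (x ∈ rng ∧ ¬ x ∈ removed) := by
    intro x
    rw [hremB, PySem.Set.mem_diff, PySem.Set.mem_ofList, PySem.Set.mem_ofList]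
  have hmemA : ∀ x, x ∈ PySem.Set.ofList remaining ↔ (x ∈ rng ∧ ¬ x ∈ removed) := by
    intro x
    rw [PySem.Set.mem_ofList, hrem, List.mem_filter]
    simp
  have hrm : ∀ x, x ∈ (PySem.Set.ofList remaining : List Int) ↔ x ∈ remB := by
    intro x; rw [hmemA, hmemB]
  by_cases hemp : remaining = []
  · rw [if_pos hemp]
    have hno : ∀ s ∈ rng, ¬ s ∈ remB := by
      intro s hsr hsB
      have : s ∈ remaining := by
        rw [hrem, List.mem_filter]
        exact ⟨hsr, by simpa using ((hmemB s).1 hsB).2⟩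
      rw [hemp] at this
      cases this
    rw [outerB_none adj remB rng [] [] hno]
    rfl
  · rw [if_neg hemp]
    have hfilter : remaining = rng.filter (fun v => decide (v ∈ (PySem.Set.ofList remaining : List Int))) := by
      rw [hrem]
      refine List.filter_congr ?_
      intro x hx
      simp only [decide_eq_decide]
      rw [hmemA]
      simp [hx]
    rw [show outerA adj (PySem.Set.ofList remaining) remaining [] []
          = outerA adj (PySem.Set.ofList remaining)
              (rng.filter (fun v => decide (v ∈ (PySem.Set.ofList remaining : List Int)))) [] []
        from by rw [← hfilter]]
    exact congrArg (fun l => PySem.List.sorted l (fun x => x) true)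
      (outer_eq adj (PySem.Set.ofList remaining) remB hrm rng [] [] [] []
        (fun x => Iff.rfl) List.nodup_nil List.nodup_nil
        (by intro u hu; cases hu) (by simp))
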